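-- pv_equiv track=rewrite | github.com/Renil-Shaji/College-Project | Zetiplan/Zetiplan.py | checkavail
-- ===== SOURCE A (Python) =====
-- def checkavail(templist3,day_var):
-- 	temp_index=0
-- 	free_periodlist=[]
-- 	for period in templist3[day_var%5]:
-- 		if period==0:
-- 			free_periodlist.append(temp_index)
-- 			temp_index+=1
-- 		else:
-- 			temp_index+=1
-- 	if len(free_periodlist)==0:
-- 		day_var+=1
-- 		return checkavail(templist3,day_var)
--
-- 	else:
-- 		return free_periodlist,day_var
-- ===== SOURCE B (Python) =====
-- def checkavail(templist3, day_var):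
--     while True:
--         free = [i for i, p in enumerate(templist3[day_var % 5]) if p == 0]
--         if free:
--             return free, day_var
--         day_var += 1
-- ===== Notes on version B (the rewrite author's own statement) =====
-- stated objective: simpler
-- what changed: Tail recursion over days replaced by an iterative while-True loop, and the explicit index-counter accumulator loop replaced by an enumerate-based comprehension.
import Mathlib
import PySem

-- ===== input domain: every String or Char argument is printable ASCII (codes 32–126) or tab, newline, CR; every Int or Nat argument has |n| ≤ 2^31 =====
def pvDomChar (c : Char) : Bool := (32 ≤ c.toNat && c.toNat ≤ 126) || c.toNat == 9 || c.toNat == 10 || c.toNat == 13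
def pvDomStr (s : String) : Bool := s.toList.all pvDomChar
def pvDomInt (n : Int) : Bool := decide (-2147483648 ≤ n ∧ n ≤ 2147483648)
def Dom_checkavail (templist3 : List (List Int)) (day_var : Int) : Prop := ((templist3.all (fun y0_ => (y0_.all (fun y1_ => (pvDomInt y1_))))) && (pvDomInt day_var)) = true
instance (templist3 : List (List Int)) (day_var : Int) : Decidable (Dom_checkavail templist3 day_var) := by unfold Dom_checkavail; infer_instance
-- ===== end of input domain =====

-- B replaces A's tail recursion over days with an iterative loop and the index-counter
-- accumulator with an enumerate-based comprehension (same cost; different decomposition).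


-- ===== PORT A =====
-- A recurses on day_var+1 when the current row has no free period; since the row index is
-- day_var % 5, the recursion revisits the same row after 5 steps, so 5 units of fuel cover
-- every input on which the Python returns (fuel exhaustion yields a junk value outside Pre_).
def checkavailGoA (templist3 : List (List Int)) (day_var : Int) : Nat → List Int × Int
  | 0 => ([], day_var)
  | fuel + 1 =>
    let row := templist3.getD (PySem.Int.mod day_var 5).toNat []
    let st := row.foldl
      (fun (st : Int × List Int) period =>
        if period == 0 then (st.1 + 1, st.2 ++ [st.1]) else (st.1 + 1, st.2))
      (0, [])
    if st.2.length == 0 then checkavailGoA templist3 (day_var + 1) fuel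
    else (st.2, day_var)

def checkavail (templist3 : List (List Int)) (day_var : Int) : List Int × Int :=
  checkavailGoA templist3 day_var 5

-- ===== PORT B =====
def freeIdxB (row : List Int) : List Int :=
  ((PySem.List.enumerate row).filter (fun p => p.2 == 0)).map (fun p => p.1)

-- the while-True loop of Source B, with the same 5 fuel units (see the comment on port A)
def checkavailGoB (templist3 : List (List Int)) (day_var : Int) : Nat → List Int × Int
  | 0 => ([], day_var)
  | fuel + 1 =>
    let free := freeIdxB (templist3.getD (PySem.Int.mod day_var 5).toNat [])
    if free.isEmpty then checkavailGoB templist3 (day_var + 1) fuel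
    else (free, day_var)

def checkavail_alt (templist3 : List (List Int)) (day_var : Int) : List Int × Int :=
  checkavailGoB templist3 day_var 5

-- ===== PRECONDITION & SPEC =====
-- Pre_: the inputs on which Python A returns: scanning rows (day_var+i) % 5 in order, some
-- row within the first 5 steps contains a 0, and every row inspected on the way (including
-- that one) is in range.  Otherwise A raises IndexError or RecursionError.
def Pre_checkavail (templist3 : List (List Int)) (day_var : Int) : Prop :=
  ∃ j ∈ List.range 5,
    (∀ i ∈ List.range j, (PySem.Int.mod (day_var + (i : Int)) 5).toNat < templist3.length ∧
        (0 : Int) ∉ templist3.getD (PySem.Int.mod (day_var + (i : Int)) 5).toNat []) ∧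
    (PySem.Int.mod (day_var + (j : Int)) 5).toNat < templist3.length ∧
    (0 : Int) ∈ templist3.getD (PySem.Int.mod (day_var + (j : Int)) 5).toNat []
instance (templist3 : List (List Int)) (day_var : Int) : Decidable (Pre_checkavail templist3 day_var) := by unfold Pre_checkavail; infer_instance

def pvWitness_checkavail : List (List Int) × Int := ([[1, 2], [3], [0, 4]], 1)

def Spec_checkavail (templist3 : List (List Int)) (day_var : Int) (out : List Int × Int) : Prop := out = checkavail_alt templist3 day_var
instance (templist3 : List (List Int)) (day_var : Int) (out : List Int × Int) : Decidable (Spec_checkavail templist3 day_var out) := by unfold Spec_checkavail; infer_instance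

-- ===== CLAIM (what is proved, stated in full; the proofs are below) =====
def Claim_equal_checkavail : Prop := ∀ (templist3 : List (List Int)) (day_var : Int), Dom_checkavail templist3 day_var → Pre_checkavail templist3 day_var → Spec_checkavail templist3 day_var (checkavail templist3 day_var)

-- ===== LEMMAS AND PROOFS =====

-- the accumulator loop of A, generalized over the running index and accumulator,
-- equals the enumerate-filter-map of B started at the same index
theorem foldl_eq_freeIdx (row : List Int) (i : Int) (acc : List Int) :
    (row.foldl
      (fun (st : Int × List Int) period =>
        if period == 0 then (st.1 + 1, st.2 ++ [st.1]) else (st.1 + 1, st.2))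
      (i, acc)).2
    = acc ++ ((PySem.List.enumerate row i).filter (fun p => p.2 == 0)).map (fun p => p.1) := by
  induction row generalizing i acc with
  | nil => simp [PySem.List.enumerate_nil]
  | cons x xs ih =>
    by_cases hx : x = 0
    · rw [List.foldl_cons, if_pos (by simp [hx] : ((x == 0) = true)), ih]
      simp [PySem.List.enumerate_cons, hx]
    · rw [List.foldl_cons, if_neg (by simp [hx] : ¬ ((x == 0) = true)), ih]
      simp [PySem.List.enumerate_cons, hx]

theorem lenBeqZero_eq_isEmpty {α β : Type} (l : List α) (a b : β) :
    (if (l.length == 0) = true then a else b) = (if l.isEmpty = true then a else b) := by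
  cases l <;> simp

theorem go_eq (templist3 : List (List Int)) (fuel : Nat) (day_var : Int) :
    checkavailGoA templist3 day_var fuel = checkavailGoB templist3 day_var fuel := by
  induction fuel generalizing day_var with
  | zero => rfl
  | succ n ih =>
    simp only [checkavailGoA, checkavailGoB, freeIdxB]
    rw [show ((templist3.getD (PySem.Int.mod day_var 5).toNat []).foldl
      (fun (st : Int × List Int) period =>
        if period == 0 then (st.1 + 1, st.2 ++ [st.1]) else (st.1 + 1, st.2))
      (0, [])).2
      = ((PySem.List.enumerate (templist3.getD (PySem.Int.mod day_var 5).toNat [])).filter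
          (fun p => p.2 == 0)).map (fun p => p.1)
      from foldl_eq_freeIdx _ 0 []]
    rw [ih, lenBeqZero_eq_isEmpty]

-- ===== VERDICT (by name: the statement is the Claim_ definition above) =====
theorem checkavail_spec : Claim_equal_checkavail := by
  intro templist3 day_var _ _
  unfold Spec_checkavail checkavail checkavail_alt
  exact go_eq templist3 5 day_var
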